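-- pv_equiv track=rewrite | github.com/Chedrian07/gdb-mcp | src/mcp-gdb/server.py | _extract_markdown_section
-- ===== SOURCE A (Python) =====
-- from typing import Dict, List, Optional, Sequence
--
-- def _extract_markdown_section(document: str, topic: str) -> str:
--     lowered = topic.lower()
--     lines = document.splitlines()
--     start_index: Optional[int] = None
--     start_level: Optional[int] = None
--
--     for idx, line in enumerate(lines):
--         if line.startswith("#"):
--             stripped = line.lstrip("#")
--             level = len(line) - len(stripped)
--             title = stripped.strip().lower()
--             if lowered in title:
--                 start_index = idx
--                 start_level = level
--                 break
--
--     if start_index is None: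
--         matches = [line for line in lines if lowered in line.lower()]
--         return "\n".join(matches[:40]).strip()
--
--     collected: List[str] = [lines[start_index]]
--     idx = start_index + 1
--     while idx < len(lines):
--         line = lines[idx]
--         if line.startswith("#"):
--             level = len(line) - len(line.lstrip("#"))
--             if start_level is not None and level <= start_level:
--                 break
--         collected.append(line)
--         idx += 1
--
--     return "\n".join(collected).strip()
-- ===== SOURCE B (Python) =====
-- def _extract_markdown_section(document: str, topic: str) -> str:
--     lowered = topic.lower()
--     lines = document.splitlines()
--     # one pass: index every heading as (line_index, level, line)
--     headings = [(i, len(ln) - len(ln.lstrip("#")), ln)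
--                 for i, ln in enumerate(lines) if ln.startswith("#")]
--     pos = next((k for k, h in enumerate(headings)
--                 if lowered in h[2].lstrip("#").strip().lower()), None)
--     if pos is None:
--         matches = [ln for ln in lines if lowered in ln.lower()]
--         return "\n".join(matches[:40]).strip()
--     start, level, _ = headings[pos]
--     end = next((i for i, lvl, _ in headings[pos + 1:] if lvl <= level), len(lines))
--     return "\n".join(lines[start:end]).strip()
-- ===== Notes on version B (the rewrite author's own statement) =====
-- stated objective: alternative
-- what changed: Replaces A's find-then-while-collect control flow (a break-out scan for the heading, then an index-driven while loop appending lines one by one) by a one-pass heading index of (line_index, level, line) triples: the section is the slice of lines between the matched heading and the next indexed heading of equal-or-lower level.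
import Mathlib
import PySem

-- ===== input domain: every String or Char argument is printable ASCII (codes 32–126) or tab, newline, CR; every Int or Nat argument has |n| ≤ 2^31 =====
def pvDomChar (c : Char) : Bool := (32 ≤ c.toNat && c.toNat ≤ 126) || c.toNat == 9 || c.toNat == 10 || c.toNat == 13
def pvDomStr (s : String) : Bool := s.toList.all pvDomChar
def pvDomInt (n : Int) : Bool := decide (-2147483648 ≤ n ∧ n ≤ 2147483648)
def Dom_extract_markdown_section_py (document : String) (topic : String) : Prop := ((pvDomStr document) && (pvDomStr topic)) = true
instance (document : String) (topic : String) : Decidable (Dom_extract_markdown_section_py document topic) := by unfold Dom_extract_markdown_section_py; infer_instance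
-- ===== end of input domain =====

-- B replaces A's find-then-while-collect control flow by a one-pass heading index
-- (line index, level, line) plus a slice between the matched heading and the next
-- heading of equal-or-lower level; objective: alternative decomposition, same cost.

-- shared helpers (both Pythons contain these exact subexpressions)
-- line.lstrip("#") : drop leading '#' characters — exact hand port (PySem has no lstrip-with-chars)
def pvHashStrip (l : List Char) : List Char := l.dropWhile (fun c => c == '#')
-- len(line) - len(line.lstrip('#'))
def pvLevel (line : String) : Nat := line.toList.length - (pvHashStrip line.toList).length
-- line.lstrip('#').strip().lower()
def pvTitle (line : String) : List Char := PySem.Chars.lower (PySem.Chars.strip (pvHashStrip line.toList))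
-- line.startswith("#")
def pvIsHeading (line : String) : Bool := PySem.Str.startswith line "#"
-- the fallback both Pythons share verbatim: "\n".join([l for l in lines if lowered in l.lower()][:40]).strip()
def pvNoSection (lowered : List Char) (lines : List String) : String :=
  PySem.Str.strip (PySem.Str.join "\n"
    (PySem.List.slice (lines.filter (fun line => PySem.Chars.isIn lowered (PySem.Chars.lower line.toList))) none (some 40)))

-- ===== PORT A =====
-- A's first for/break loop: first heading whose title contains `lowered`, as (index, level)
def pvAFind (lowered : List Char) : List String → Nat → Option (Nat × Nat)
  | [], _ => none
  | line :: rest, idx =>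
    if pvIsHeading line then
      if PySem.Chars.isIn lowered (pvTitle line) then some (idx, pvLevel line)
      else pvAFind lowered rest (idx + 1)
    else pvAFind lowered rest (idx + 1)

-- A's while loop collecting lines from idx until a heading of level ≤ start_level
def pvAWhile (lines : List String) (startLevel : Nat) (idx : Nat) : List String :=
  if h : idx < lines.length then
    if pvIsHeading lines[idx] && decide (pvLevel lines[idx] ≤ startLevel) then []
    else lines[idx] :: pvAWhile lines startLevel (idx + 1)
  else []
termination_by lines.length - idx

def extract_markdown_section_py (document : String) (topic : String) : String :=
  match pvAFind (PySem.Chars.lower topic.toList) (PySem.Str.splitlines document) 0 with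
  | none => pvNoSection (PySem.Chars.lower topic.toList) (PySem.Str.splitlines document)
  | some (startIdx, startLevel) =>
      PySem.Str.strip (PySem.Str.join "\n"
        (PySem.List.pyGetD (PySem.Str.splitlines document) (↑startIdx) ""
          :: pvAWhile (PySem.Str.splitlines document) startLevel (startIdx + 1)))

-- ===== PORT B =====
-- [(i, len(ln)-len(ln.lstrip('#')), ln) for i, ln in enumerate(lines) if ln.startswith('#')]
def pvBHeadings (lines : List String) (i₀ : Int) : List (Int × Nat × String) :=
  (PySem.List.enumerate lines i₀).filterMap
    (fun p => if pvIsHeading p.2 then some (p.1, pvLevel p.2, p.2) else none)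

-- next((i for i, lvl, _ in hsAfter if lvl <= level), nLines)
def pvBEnd (hsAfter : List (Int × Nat × String)) (level : Nat) (nLines : Nat) : Int :=
  match hsAfter.find? (fun h' => decide (h'.2.1 ≤ level)) with
  | some h' => h'.1
  | none => (nLines : Int)

def extract_markdown_section_py_alt (document : String) (topic : String) : String :=
  match (pvBHeadings (PySem.Str.splitlines document) 0).findIdx?
      (fun h => PySem.Chars.isIn (PySem.Chars.lower topic.toList) (pvTitle h.2.2)) with
  | none => pvNoSection (PySem.Chars.lower topic.toList) (PySem.Str.splitlines document)
  | some pos =>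
      let hs := pvBHeadings (PySem.Str.splitlines document) 0
      let h := hs.getD pos (0, 0, "")
      PySem.Str.strip (PySem.Str.join "\n"
        (PySem.List.slice (PySem.Str.splitlines document) (some h.1)
          (some (pvBEnd (hs.drop (pos + 1)) h.2.1 (PySem.Str.splitlines document).length))))

-- ===== PRECONDITION & SPEC =====
def Spec_extract_markdown_section_py (document : String) (topic : String) (out : String) : Prop := out = extract_markdown_section_py_alt document topic
instance (document : String) (topic : String) (out : String) : Decidable (Spec_extract_markdown_section_py document topic out) := by unfold Spec_extract_markdown_section_py; infer_instance

-- ===== CLAIM (what is proved, stated in full; the proofs are below) =====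
def Claim_equal_extract_markdown_section_py : Prop := ∀ (document : String) (topic : String), Dom_extract_markdown_section_py document topic → Spec_extract_markdown_section_py document topic (extract_markdown_section_py document topic)

-- ===== LEMMAS AND PROOFS =====

-- reference decomposition both ports are reduced to
def pvMatch (lowered : List Char) (line : String) : Bool :=
  pvIsHeading line && PySem.Chars.isIn lowered (pvTitle line)

def pvTakeSec (lvl : Nat) (rest : List String) : List String :=
  rest.takeWhile (fun l => !(pvIsHeading l && decide (pvLevel l ≤ lvl)))

def pvRef (lowered : List Char) : List String → Option (List String)
  | [] => none
  | line :: rest =>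
    if pvMatch lowered line then some (line :: pvTakeSec (pvLevel line) rest)
    else pvRef lowered rest

def pvRefRun (lowered : List Char) (lines : List String) : String :=
  match pvRef lowered lines with
  | none => pvNoSection lowered lines
  | some seg => PySem.Str.strip (PySem.Str.join "\n" seg)

-- A's while loop is takeWhile on the suffix
lemma pvAWhile_eq (lines : List String) (lvl : Nat) :
    ∀ idx, pvAWhile lines lvl idx = pvTakeSec lvl (lines.drop idx) := by
  have key : ∀ n idx, lines.length - idx ≤ n → pvAWhile lines lvl idx = pvTakeSec lvl (lines.drop idx) := by
    intro n
    induction n with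
    | zero =>
      intro idx h
      have hge : lines.length ≤ idx := by omega
      rw [pvAWhile]
      simp [Nat.not_lt_of_le hge, List.drop_eq_nil_of_le hge, pvTakeSec]
    | succ n ih =>
      intro idx h
      rw [pvAWhile]
      by_cases hlt : idx < lines.length
      · rw [dif_pos hlt, List.drop_eq_getElem_cons hlt]
        rw [pvTakeSec, List.takeWhile_cons]
        have hrec := ih (idx + 1) (by omega)
        rw [pvTakeSec] at hrec
        by_cases hc : (pvIsHeading lines[idx] && decide (pvLevel lines[idx] ≤ lvl)) = true
        · simp [hc]
        · simp [hc, hrec]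
      · rw [dif_neg hlt]
        have hge : lines.length ≤ idx := by omega
        simp [List.drop_eq_nil_of_le hge, pvTakeSec]
  exact fun idx => key (lines.length - idx) idx (le_refl _)

lemma pvAFind_none (lowered : List Char) :
    ∀ (lines : List String) (i₀ : Nat), pvAFind lowered lines i₀ = none → pvRef lowered lines = none := by
  intro lines
  induction lines with
  | nil => intro i₀ _; rfl
  | cons line rest ih =>
    intro i₀ h
    by_cases h1 : pvIsHeading line = true
    · by_cases h2 : PySem.Chars.isIn lowered (pvTitle line) = true
      · simp [pvAFind, h1, h2] at h
      · simp only [pvAFind, h1, h2, if_true, if_false, Bool.false_eq_true] at h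
        simp [pvRef, pvMatch, h1, h2, ih _ h]
    · simp only [pvAFind, h1, if_false, Bool.false_eq_true] at h
      simp [pvRef, pvMatch, h1, ih _ h]

lemma pvAFind_some (lowered : List Char) :
    ∀ (lines : List String) (i₀ : Nat) (s l : Nat), pvAFind lowered lines i₀ = some (s, l) →
      ∃ k, s = i₀ + k ∧ ∃ hk : k < lines.length,
        pvMatch lowered lines[k] = true ∧ l = pvLevel lines[k] ∧
        pvRef lowered lines = some (lines[k] :: pvTakeSec l (lines.drop (k + 1))) := by
  intro lines
  induction lines with
  | nil => intro i₀ s l h; simp [pvAFind] at h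
  | cons line rest ih =>
    intro i₀ s l h
    by_cases h1 : pvIsHeading line = true
    · by_cases h2 : PySem.Chars.isIn lowered (pvTitle line) = true
      · simp only [pvAFind, h1, h2, if_true] at h
        obtain ⟨hs, hl⟩ := Prod.mk.injEq .. ▸ Option.some.injEq .. ▸ h
        refine ⟨0, by omega, by simp, ?_, ?_, ?_⟩
        · simp [pvMatch, h1, h2]
        · simpa using hl.symm
        · simp [pvRef, pvMatch, h1, h2, ← hl]
      · simp only [pvAFind, h1, h2, if_true, if_false, Bool.false_eq_true] at h
        obtain ⟨k', hs, hk', hm, hl, href⟩ := ih _ _ _ h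
        refine ⟨k' + 1, by omega, by simpa using Nat.succ_lt_succ hk', ?_, ?_, ?_⟩
        · simpa using hm
        · simpa using hl
        · simp [pvRef, pvMatch, h1, h2, href]
    · simp only [pvAFind, h1, if_false, Bool.false_eq_true] at h
      obtain ⟨k', hs, hk', hm, hl, href⟩ := ih _ _ _ h
      refine ⟨k' + 1, by omega, by simpa using Nat.succ_lt_succ hk', ?_, ?_, ?_⟩
      · simpa using hm
      · simpa using hl
      · simp [pvRef, pvMatch, h1, href]

lemma pvBHeadings_nil (i : Int) : pvBHeadings [] i = [] := rfl

lemma pvBHeadings_cons (x : String) (xs : List String) (i : Int) :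
    pvBHeadings (x :: xs) i =
      if pvIsHeading x then (i, pvLevel x, x) :: pvBHeadings xs (i + 1) else pvBHeadings xs (i + 1) := by
  by_cases h1 : pvIsHeading x = true <;>
    simp [pvBHeadings, PySem.List.enumerate, h1]

lemma pvBEnd_none (lvl : Nat) :
    ∀ (rest : List String) (j : Nat),
      (pvBHeadings rest ↑j).find? (fun h' => decide (h'.2.1 ≤ lvl)) = none →
      pvTakeSec lvl rest = rest := by
  intro rest
  induction rest with
  | nil => intro j _; rfl
  | cons x xs ih =>
    intro j h
    rw [pvBHeadings_cons] at h
    by_cases h1 : pvIsHeading x = true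
    · rw [if_pos h1, List.find?_cons] at h
      by_cases h2 : pvLevel x ≤ lvl
      · simp [h2] at h
      · simp only [h2, decide_false] at h
        have : (j : Int) + 1 = ((j + 1 : Nat) : Int) := by push_cast; ring
        rw [this] at h
        have hrec := ih (j+1) h
        rw [pvTakeSec] at hrec ⊢
        rw [List.takeWhile_cons]
        simp only [h1, h2, decide_false, Bool.and_false, Bool.not_false, if_true]
        rw [hrec]
    · rw [if_neg h1] at h
      have : (j : Int) + 1 = ((j + 1 : Nat) : Int) := by push_cast; ring
      rw [this] at h
      have hrec := ih (j+1) h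
      rw [pvTakeSec] at hrec ⊢
      rw [List.takeWhile_cons]
      simp only [Bool.not_eq_true] at h1
      simp only [h1, Bool.false_and, Bool.not_false, reduceIte]
      rw [hrec]

lemma pvBEnd_some (lvl : Nat) :
    ∀ (rest : List String) (j : Nat) (h' : Int × Nat × String),
      (pvBHeadings rest ↑j).find? (fun h' => decide (h'.2.1 ≤ lvl)) = some h' →
      ∃ m, h'.1 = ↑(j + m) ∧ pvTakeSec lvl rest = rest.take m := by
  intro rest
  induction rest with
  | nil => intro j h' h; simp [pvBHeadings_nil] at h
  | cons x xs ih =>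
    intro j h' h
    rw [pvBHeadings_cons] at h
    have hcast : (j : Int) + 1 = ((j + 1 : Nat) : Int) := by push_cast; ring
    by_cases h1 : pvIsHeading x = true
    · rw [if_pos h1, List.find?_cons] at h
      by_cases h2 : pvLevel x ≤ lvl
      · simp only [h2, decide_true, Option.some.injEq] at h
        refine ⟨0, ?_, ?_⟩
        · rw [← h]; simp
        · simp [pvTakeSec, h1, h2]
      · simp only [h2, decide_false] at h
        rw [hcast] at h
        obtain ⟨m', hm1, hm2⟩ := ih (j+1) h' h
        refine ⟨m' + 1, by rw [hm1]; congr 1; omega, ?_⟩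
        rw [pvTakeSec] at hm2 ⊢
        rw [List.takeWhile_cons, List.take_succ_cons]
        simp only [h1, h2, decide_false, Bool.and_false, Bool.not_false, reduceIte]
        rw [hm2]
    · rw [if_neg h1, hcast] at h
      obtain ⟨m', hm1, hm2⟩ := ih (j+1) h' h
      simp only [Bool.not_eq_true] at h1
      refine ⟨m' + 1, by rw [hm1]; congr 1; omega, ?_⟩
      rw [pvTakeSec] at hm2 ⊢
      rw [List.takeWhile_cons, List.take_succ_cons]
      simp only [h1, Bool.false_and, Bool.not_false, reduceIte]
      rw [hm2]

lemma pvBFind_none (lowered : List Char) :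
    ∀ (lines : List String) (i₀ : Int),
      (pvBHeadings lines i₀).findIdx? (fun h => PySem.Chars.isIn lowered (pvTitle h.2.2)) = none →
      pvRef lowered lines = none := by
  intro lines
  induction lines with
  | nil => intro i₀ _; rfl
  | cons x xs ih =>
    intro i₀ h
    rw [pvBHeadings_cons] at h
    by_cases h1 : pvIsHeading x = true
    · rw [if_pos h1, List.findIdx?_cons] at h
      by_cases h2 : PySem.Chars.isIn lowered (pvTitle x) = true
      · simp [h2] at h
      · simp only [h2, Bool.false_eq_true, reduceIte, Option.map_eq_none_iff] at h
        simp [pvRef, pvMatch, h1, h2, ih _ h]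
    · rw [if_neg h1] at h
      simp [pvRef, pvMatch, h1, ih _ h]

lemma pvBFind_some (lowered : List Char) :
    ∀ (lines : List String) (i₀ : Nat) (pos : Nat),
      (pvBHeadings lines ↑i₀).findIdx? (fun h => PySem.Chars.isIn lowered (pvTitle h.2.2)) = some pos →
      ∃ k, ∃ hk : k < lines.length,
        (pvBHeadings lines ↑i₀).getD pos (0, 0, "") = (↑(i₀ + k), pvLevel lines[k], lines[k]) ∧
        (pvBHeadings lines ↑i₀).drop (pos + 1) = pvBHeadings (lines.drop (k + 1)) ↑(i₀ + k + 1) ∧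
        pvRef lowered lines = some (lines[k] :: pvTakeSec (pvLevel lines[k]) (lines.drop (k + 1))) := by
  intro lines
  induction lines with
  | nil => intro i₀ pos h; simp [pvBHeadings_nil] at h
  | cons x xs ih =>
    intro i₀ pos h
    have hcast : (i₀ : Int) + 1 = ((i₀ + 1 : Nat) : Int) := by push_cast; ring
    by_cases h1 : pvIsHeading x = true
    · rw [pvBHeadings_cons, if_pos h1, List.findIdx?_cons] at h
      by_cases h2 : PySem.Chars.isIn lowered (pvTitle x) = true
      · simp only [h2, reduceIte, Option.some.injEq] at h
        subst h
        refine ⟨0, by simp, ?_, ?_, ?_⟩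
        · rw [pvBHeadings_cons, if_pos h1]; simp
        · rw [pvBHeadings_cons, if_pos h1]
          simp only [List.drop_succ_cons, List.drop_zero]
          congr 1
        · simp [pvRef, pvMatch, h1, h2]
      · simp only [h2, Bool.false_eq_true, reduceIte] at h
        obtain ⟨pos', hp', hpos⟩ := Option.map_eq_some_iff.mp h
        rw [hcast] at hp'
        obtain ⟨k', hk', hget, hdrop, href⟩ := ih (i₀ + 1) pos' hp'
        subst hpos
        refine ⟨k' + 1, by simpa using Nat.succ_lt_succ hk', ?_, ?_, ?_⟩
        · have harith : i₀ + (k' + 1) = i₀ + 1 + k' := by omega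
          rw [pvBHeadings_cons, if_pos h1, List.getD_cons_succ, hcast, hget, harith]
          simp
        · rw [pvBHeadings_cons, if_pos h1, List.drop_succ_cons, hcast, hdrop,
            List.drop_succ_cons]
          congr 1
          omega
        · simp only [pvRef, pvMatch, h1, h2, Bool.and_false, Bool.false_eq_true, reduceIte] at href ⊢
          simpa using href
    · rw [pvBHeadings_cons, if_neg h1, hcast] at h
      obtain ⟨k', hk', hget, hdrop, href⟩ := ih (i₀ + 1) pos h
      refine ⟨k' + 1, by simpa using Nat.succ_lt_succ hk', ?_, ?_, ?_⟩
      · have harith : i₀ + (k' + 1) = i₀ + 1 + k' := by omega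
        rw [pvBHeadings_cons, if_neg h1, hcast, hget, harith]
        simp
      · rw [pvBHeadings_cons, if_neg h1, hcast, hdrop, List.drop_succ_cons]
        congr 1
        omega
      · simp only [pvRef, pvMatch, h1, Bool.false_eq_true, Bool.false_and, reduceIte] at href ⊢
        simpa using href

lemma pvA_eq_refRun (document topic : String) :
    extract_markdown_section_py document topic =
      pvRefRun (PySem.Chars.lower topic.toList) (PySem.Str.splitlines document) := by
  unfold extract_markdown_section_py pvRefRun
  cases hA : pvAFind (PySem.Chars.lower topic.toList) (PySem.Str.splitlines document) 0 with
  | none => rw [pvAFind_none _ _ _ hA]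
  | some sl =>
    obtain ⟨s, l⟩ := sl
    obtain ⟨k, hs, hk, hm, hl, href⟩ := pvAFind_some _ _ _ _ _ hA
    rw [href]
    have hs' : s = k := by omega
    subst hs'
    dsimp only
    rw [pvAWhile_eq]
    congr 2
    rw [PySem.List.pyGetD_eq_getElem _ _ (by positivity) (by exact_mod_cast hk)]
    simp

lemma pvB_eq_refRun (document topic : String) :
    extract_markdown_section_py_alt document topic =
      pvRefRun (PySem.Chars.lower topic.toList) (PySem.Str.splitlines document) := by
  unfold extract_markdown_section_py_alt pvRefRun pvBEnd
  have h0 : (0 : Int) = ((0 : Nat) : Int) := rfl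
  cases hB : (pvBHeadings (PySem.Str.splitlines document) 0).findIdx?
      (fun h => PySem.Chars.isIn (PySem.Chars.lower topic.toList) (pvTitle h.2.2)) with
  | none => rw [pvBFind_none _ _ _ hB]
  | some pos =>
    rw [h0] at hB
    obtain ⟨k, hk, hget, hdrop, href⟩ := pvBFind_some _ _ _ _ hB
    rw [href]
    dsimp only
    rw [show pvBHeadings (PySem.Str.splitlines document) 0
          = pvBHeadings (PySem.Str.splitlines document) ((0 : Nat) : Int) from rfl,
        hget, hdrop]
    dsimp only
    cases hE : (pvBHeadings ((PySem.Str.splitlines document).drop (k + 1)) ↑(0 + k + 1)).find?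
        (fun h' => decide (h'.2.1 ≤ pvLevel (PySem.Str.splitlines document)[k])) with
    | none =>
      have htake := pvBEnd_none _ _ _ hE
      dsimp only
      rw [show ((PySem.Str.splitlines document).length : Int)
            = (((PySem.Str.splitlines document).length : Nat) : Int) from rfl]
      rw [show ((0 + k : Nat) : Int) = ((k : Nat) : Int) by norm_num]
      rw [PySem.List.slice_natCast, htake]
      rw [List.take_of_length_le (by simp), List.drop_eq_getElem_cons hk]
    | some h' =>
      obtain ⟨m, hm1, hm2⟩ := pvBEnd_some _ _ _ _ hE
      dsimp only
      rw [hm1, show ((0 + k : Nat) : Int) = ((k : Nat) : Int) by norm_num,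
        PySem.List.slice_natCast, hm2]
      rw [show 0 + k + 1 + m - k = m + 1 by omega]
      rw [List.drop_eq_getElem_cons hk, List.take_succ_cons]

-- ===== VERDICT (by name: the statement is the Claim_ definition above) =====
theorem extract_markdown_section_py_spec : Claim_equal_extract_markdown_section_py := by
  intro document topic _
  unfold Spec_extract_markdown_section_py
  rw [pvA_eq_refRun, pvB_eq_refRun]
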